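-- pv_equiv track=rewrite | github.com/muslimbek77/tic-tac-toe-bot | main.py | _check_finished
-- ===== SOURCE A (Python) =====
-- def _check_finished(items):
--     finished = True
--     temp = None
--
--     for i in items:
--         if i == 0:
--             finished = False
--             break
--         else:
--             if temp is None:
--                 temp = i
--
--             if temp != i:
--                 finished = False
--     if finished:
--         return temp
--     else:
--         return None
-- ===== SOURCE B (Python) =====
-- def _check_finished(items):
--     s = set(items)
--     if len(s) == 1 and 0 not in s:
--         return next(iter(s))
--     return None
-- ===== Notes on version B (the rewrite author's own statement) =====
-- stated objective: simpler
-- what changed: Replaced the early-exit loop with mutable finished/temp flags by a whole-collection check: build set(items) once and return its sole element iff the set has size 1 and does not contain 0.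
import Mathlib
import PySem

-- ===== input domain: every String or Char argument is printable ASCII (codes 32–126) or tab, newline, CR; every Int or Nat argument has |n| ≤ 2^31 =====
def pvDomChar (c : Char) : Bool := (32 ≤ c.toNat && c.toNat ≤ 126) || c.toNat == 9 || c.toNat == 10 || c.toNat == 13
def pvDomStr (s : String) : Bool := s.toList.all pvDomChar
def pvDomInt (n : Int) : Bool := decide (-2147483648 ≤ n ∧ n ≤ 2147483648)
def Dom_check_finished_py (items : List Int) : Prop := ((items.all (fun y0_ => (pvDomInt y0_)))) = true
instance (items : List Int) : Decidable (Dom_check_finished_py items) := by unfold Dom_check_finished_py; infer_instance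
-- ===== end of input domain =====

-- B builds set(items) once and decides from its size/membership instead of A's early-exit loop with flags (objective: simpler).

-- ===== PORT A =====
-- the for-loop with its mutable (finished, temp) state; 'break' returns the state immediately
def pvLoopA : List Int → Bool → Option Int → Bool × Option Int
  | [], finished, temp => (finished, temp)
  | i :: rest, finished, temp =>
    if i = 0 then (false, temp)
    else
      let temp' := if temp = none then some i else temp
      let finished' := if temp' ≠ some i then false else finished
      pvLoopA rest finished' temp'

def check_finished_py (items : List Int) : Option Int :=
  let r := pvLoopA items true none
  if r.1 then r.2 else none

-- ===== PORT B =====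
def check_finished_py_alt (items : List Int) : Option Int :=
  let s : PySem.Set Int := PySem.Set.ofList items
  if PySem.Set.len s = 1 && !(PySem.Set.contains s 0) then s.head? else none

-- ===== PRECONDITION & SPEC =====
def Spec_check_finished_py (items : List Int) (out : Option Int) : Prop := out = check_finished_py_alt items
instance (items : List Int) (out : Option Int) : Decidable (Spec_check_finished_py items out) := by unfold Spec_check_finished_py; infer_instance

-- ===== CLAIM (what is proved, stated in full; the proofs are below) =====
def Claim_equal_check_finished_py : Prop := ∀ (items : List Int), Dom_check_finished_py items → Spec_check_finished_py items (check_finished_py items)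

-- ===== LEMMAS AND PROOFS =====

-- once temp is set it never changes
theorem pvLoopA_snd (l : List Int) (f : Bool) (t : Int) : (pvLoopA l f (some t)).2 = some t := by
  induction l generalizing f with
  | nil => rfl
  | cons i rest ih =>
    simp only [pvLoopA]
    split
    · rfl
    · simpa using ih _

theorem pvLoopA_fst (l : List Int) (f : Bool) (t : Int) (ht : t ≠ 0) :
    (pvLoopA l f (some t)).1 = (f && l.all (fun i => decide (i = t))) := by
  induction l generalizing f with
  | nil => simp [pvLoopA]
  | cons i rest ih =>
    simp only [pvLoopA]
    split
    · rename_i h0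
      subst h0
      simp [Ne.symm ht]
    · simp only [reduceCtorEq, if_false, List.all_cons]
      rw [ih]
      by_cases hit : i = t
      · simp [hit]
      · have hti : ¬ t = i := fun h => hit h.symm
        simp [hit, hti]

theorem ofList_eq_singleton_of_all (i : Int) (rest : List Int)
    (h : ∀ j ∈ rest, j = i) : PySem.Set.ofList (i :: rest) = [i] := by
  have key : ∀ (l : List Int), (∀ j ∈ l, j = i) → PySem.Set.update [i] l = [i] := by
    intro l
    induction l with
    | nil => intro _; rfl
    | cons j tl ih =>
      intro hj
      have hji : j = i := hj j (by simp)
      rw [PySem.Set.update_cons, PySem.Set.add_of_mem (by simp [hji])]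
      exact ih (fun k hk => hj k (by simp [hk]))
  have : PySem.Set.ofList (i :: rest) = PySem.Set.update (PySem.Set.ofList [i]) rest := by
    rw [← PySem.Set.ofList_append]
    rfl
  rw [this]
  have h1 : PySem.Set.ofList [i] = [i] := rfl
  rw [h1, key rest h]

theorem len_ne_one_of_two_mem (s : List Int) (a b : Int) (hab : a ≠ b)
    (ha : a ∈ s) (hb : b ∈ s) : s.length ≠ 1 := by
  intro hlen
  obtain ⟨x, rfl⟩ := List.length_eq_one_iff.mp hlen
  simp at ha hb
  exact hab (ha.trans hb.symm)

-- ===== VERDICT (by name: the statement is the Claim_ definition above) =====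
theorem check_finished_py_spec : Claim_equal_check_finished_py := by
  unfold Claim_equal_check_finished_py
  intro items _
  unfold Spec_check_finished_py
  cases items with
  | nil => rfl
  | cons i rest =>
    by_cases h0 : i = 0
    · -- loop breaks immediately; 0 is in the set so B returns none
      subst h0
      simp [check_finished_py, check_finished_py_alt, pvLoopA]
    · have hred : pvLoopA (i :: rest) true none = pvLoopA rest true (some i) := by
        simp [pvLoopA, h0]
      simp only [check_finished_py, check_finished_py_alt]
      rw [hred, pvLoopA_fst rest true i h0, pvLoopA_snd rest _ i]
      by_cases hall : ∀ j ∈ rest, j = i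
      · have hs := ofList_eq_singleton_of_all i rest hall
        have hA : (true && rest.all (fun j => decide (j = i))) = true := by
          simp only [Bool.true_and, List.all_eq_true]
          intro j hj; exact decide_eq_true (hall j hj)
        rw [hA, hs]
        simp [PySem.Set.len]
        omega
      · push Not at hall
        obtain ⟨j, hj, hji⟩ := hall
        have hA : (true && rest.all (fun k => decide (k = i))) = false := by
          simp only [Bool.true_and, List.all_eq_false]
          exact ⟨j, hj, by simp [hji]⟩
        rw [hA]
        have hlen : (PySem.Set.ofList (i :: rest)).length ≠ 1 :=
          len_ne_one_of_two_mem _ i j (Ne.symm hji)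
            (by rw [PySem.Set.mem_ofList]; simp)
            (by rw [PySem.Set.mem_ofList]; simp [hj])
        have : (PySem.Set.len (PySem.Set.ofList (i :: rest)) = 1 &&
            !PySem.Set.contains (PySem.Set.ofList (i :: rest)) 0) = false := by
          simp only [PySem.Set.len, Bool.and_eq_false_iff]
          left
          simp only [decide_eq_false_iff_not]
          intro hc
          exact hlen (by exact_mod_cast hc)
        rw [this]
        rfl
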